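-- pv_equiv track=rewrite | github.com/christofhaerens/advent_of_code | 2017/day21/puzzle21.py | split_square
-- ===== SOURCE A (Python) =====
-- def split_square(square):
--     sq = square.split('/')
--     l = len(sq)
--     squares = {}
--     if l > 3:
--         for split in (2, 3):
--             if l % split == 0:
--                 for r in range(l):
--                     x = r % split
--                     xcount = r // split
--                     for c in range(l):
--                         y = c % split
--                         ycount = c // split
--                         sq_count = xcount * (l // split) + ycount
--                         count = x * split + y
--                         if sq_count in squares:
--                             squares[sq_count] += sq[r][c]
--                             if y == (split - 1) and count + 1 != split**2:
--                                 squares[sq_count] += '/'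
--                         else:
--                             squares[sq_count] = sq[r][c]
--                 return [squares[i] for i in range(len(squares))]
--     else:
--         return [square]
-- ===== SOURCE B (Python) =====
-- def split_square(square):
--     rows = square.split('/')
--     l = len(rows)
--     if l <= 3:
--         return [square]
--     if l % 2 == 0:
--         step = 2
--     elif l % 3 == 0:
--         step = 3
--     else:
--         return None
--     n = l // step
--     blocks = []
--     for bi in range(n):
--         for bj in range(n):
--             blocks.append('/'.join(row[bj * step:(bj + 1) * step]
--                                    for row in rows[bi * step:(bi + 1) * step]))
--     return blocks
-- ===== Notes on version B (the rewrite author's own statement) =====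
-- stated objective: simpler
-- what changed: A assembles blocks cell by cell via modular arithmetic into a dict keyed by block index and then reads the dict back; B slices the grid directly block-row by block-row, joining the row slices with the separator, with no dict and no per-cell bookkeeping.
-- outside the precondition, e.g. on split_square('aaaaa/aaaaa/aaaaa/aaaaa/aaaaa'): A returns None, B returns None
import Mathlib
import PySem

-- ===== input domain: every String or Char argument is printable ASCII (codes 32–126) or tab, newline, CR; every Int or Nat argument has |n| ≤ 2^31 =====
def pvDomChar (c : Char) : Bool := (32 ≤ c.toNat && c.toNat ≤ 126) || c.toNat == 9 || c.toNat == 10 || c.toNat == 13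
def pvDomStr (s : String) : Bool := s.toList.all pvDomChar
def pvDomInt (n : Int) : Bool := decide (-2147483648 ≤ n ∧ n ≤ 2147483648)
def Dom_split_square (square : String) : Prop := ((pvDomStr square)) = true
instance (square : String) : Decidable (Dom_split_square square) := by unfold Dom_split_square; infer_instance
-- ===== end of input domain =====

-- B replaces A's per-cell modular-arithmetic dict assembly by a direct block-by-block slicing pass (simpler).

-- ===== PORT A =====
-- the body of A's inner 'for c in range(l)' loop (x, xcount recomputed from r as in the outer loop)
def splitA_cell (sq : List String) (l s r : Nat) (d : PySem.Dict Nat String) (c : Nat) :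
    PySem.Dict Nat String :=
  let x := r % s
  let xcount := r / s
  let y := c % s
  let ycount := c / s
  let sq_count := xcount * (l / s) + ycount
  let count := x * s + y
  let ch := ((PySem.Str.pyGet? (PySem.List.pyGetD sq (r : Int) "") (c : Int)).getD ' ').toString
  if (d.get? sq_count).isSome then
    let d1 := d.insert sq_count (d.getD sq_count "" ++ ch)
    if y = s - 1 ∧ count + 1 ≠ s ^ 2 then d1.insert sq_count (d1.getD sq_count "" ++ "/") else d1
  else d.insert sq_count ch

-- the double loop over r and c plus the final '[squares[i] for i in range(len(squares))]'
def splitA_build (sq : List String) (l s : Nat) : List String :=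
  let squares := (List.range l).foldl (fun d r => (List.range l).foldl (splitA_cell sq l s r) d)
    PySem.Dict.empty
  (List.range squares.size).map (fun i => (squares.get? i).getD "")

def split_square (square : String) : List String :=
  let sq := (PySem.Str.split? square "/").getD []   -- square.split('/'); sep ≠ "" so split? is some
  let l := sq.length
  if 3 < l then
    if l % 2 = 0 then splitA_build sq l 2
    else if l % 3 = 0 then splitA_build sq l 3
    else []   -- Python: the for-loop falls through and A returns None; excluded by Pre_
  else [square]

-- ===== PORT B =====
-- one block: '/'.join(row[bj*step:(bj+1)*step] for row in rows[bi*step:(bi+1)*step])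
def splitB_block (rows : List String) (s bi bj : Nat) : String :=
  PySem.Str.join "/"
    ((PySem.List.slice rows (some (bi * s : Nat)) (some ((bi * s : Nat) + (s : Nat)))).map
      (fun row => PySem.Str.slice row (some (bj * s : Nat)) (some ((bj * s : Nat) + (s : Nat)))))

def splitB_build (rows : List String) (l s : Nat) : List String :=
  let n := l / s
  (List.range n).foldl (fun blocks bi =>
    (List.range n).foldl (fun blocks bj => blocks ++ [splitB_block rows s bi bj]) blocks) []

def split_square_alt (square : String) : List String :=
  let rows := (PySem.Str.split? square "/").getD []
  let l := rows.length
  if l ≤ 3 then [square]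
  else if l % 2 = 0 then splitB_build rows l 2
  else if l % 3 = 0 then splitB_build rows l 3
  else []

-- ===== PRECONDITION & SPEC =====
-- Pre_ excludes exactly the inputs on which the Python A does not return a list of strings: grids of
-- more than 3 rows whose row count is divisible by neither 2 nor 3 (A falls off the for-loop and
-- returns None), and grids of more than 3 rows containing a row shorter than the number of rows
-- (A raises IndexError on sq[r][c]).
def Pre_split_square (square : String) : Prop :=
  let sq := (PySem.Str.split? square "/").getD []
  let l := sq.length
  3 < l → ((l % 2 = 0 ∨ l % 3 = 0) ∧ ∀ row ∈ sq, l ≤ row.toList.length)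
instance (square : String) : Decidable (Pre_split_square square) := by
  unfold Pre_split_square; infer_instance

def pvWitness_split_square : String := "abcd/efgh/ijkl/mnop"

def Spec_split_square (square : String) (out : List String) : Prop := out = split_square_alt square
instance (square : String) (out : List String) : Decidable (Spec_split_square square out) := by
  unfold Spec_split_square; infer_instance

-- ===== CLAIM (what is proved, stated in full; the proofs are below) =====
def Claim_equal_split_square : Prop := ∀ (square : String), Dom_split_square square →
  Pre_split_square square → Spec_split_square square (split_square square)

-- ===== LEMMAS AND PROOFS =====

def chS (sq : List String) (r c : Nat) : String :=
  ((PySem.Str.pyGet? (PySem.List.pyGetD sq (r : Int) "") (c : Int)).getD ' ').toString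

def gS (sq : List String) (s r c : Nat) : String :=
  chS sq r c ++ (if c % s = s - 1 ∧ (r % s) * s + (c % s) + 1 ≠ s ^ 2 then "/" else "")

theorem cell_some (sq : List String) (l s r c : Nat) (d : PySem.Dict Nat String) (k0 : Nat)
    (v : String) (hv : d.get? k0 = some v) (hk : (r / s) * (l / s) + c / s = k0) :
    splitA_cell sq l s r d c = d.insert k0 (v ++ gS sq s r c) := by
  unfold splitA_cell
  simp only [hk, hv, Option.isSome_some, if_true, gS, chS]
  rw [PySem.Dict.getD_of_get?_eq_some d "" hv]
  split_ifs with h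
  · rw [PySem.Dict.getD_of_get?_eq_some _ "" (PySem.Dict.get?_insert_self _ _ _),
      PySem.Dict.insert_insert_self, String.append_assoc]
  · simp

theorem gS_first (sq : List String) (s r c : Nat) (hs : 2 ≤ s) (hy : c % s = 0) :
    gS sq s r c = chS sq r c := by
  have : ¬ (c % s = s - 1 ∧ (r % s) * s + (c % s) + 1 ≠ s ^ 2) := by
    rintro ⟨h1, _⟩; omega
  simp [gS, this]

theorem cell_fresh (sq : List String) (l s r c : Nat) (d : PySem.Dict Nat String) (k0 : Nat)
    (hv : d.get? k0 = none) (hk : (r / s) * (l / s) + c / s = k0) :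
    splitA_cell sq l s r d c = d.insert k0 (chS sq r c) := by
  unfold splitA_cell
  simp only [hk, hv, Option.isSome_none, Bool.false_eq_true, if_false, chS]

def scat : List String → String := fun ls => ls.foldr (· ++ ·) ""

theorem scat_nil : scat [] = "" := rfl

theorem scat_cons (x : String) (ls : List String) : scat (x :: ls) = x ++ scat ls := rfl

theorem fold_cells_some (sq : List String) (l s r : Nat) (j : Nat) (js : List Nat)
    (d : PySem.Dict Nat String) (k0 : Nat) (v : String) (hv : d.get? k0 = some v)
    (hk : ∀ c ∈ j :: js, (r / s) * (l / s) + c / s = k0) :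
    (j :: js).foldl (splitA_cell sq l s r) d
      = d.insert k0 (v ++ scat ((j :: js).map (gS sq s r))) := by
  induction js generalizing d v j with
  | nil =>
      simp only [List.foldl_cons, List.foldl_nil, List.map_cons, List.map_nil, scat_cons]
      rw [cell_some sq l s r j d k0 v hv (hk j (by simp))]
      simp [scat]
  | cons j2 js ih =>
      simp only [List.foldl_cons]
      rw [cell_some sq l s r j d k0 v hv (hk j (by simp))]
      have := ih j2 (d.insert k0 (v ++ gS sq s r j)) (v ++ gS sq s r j)
        (PySem.Dict.get?_insert_self _ _ _)
        (fun c hc => hk c (by simp at hc ⊢; tauto))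
      rw [List.foldl_cons] at this
      rw [this, PySem.Dict.insert_insert_self]
      congr 1
      simp [scat_cons, String.append_assoc]

theorem fold_cells_fresh (sq : List String) (l s r : Nat) (j : Nat) (js : List Nat)
    (d : PySem.Dict Nat String) (k0 : Nat) (hs : 2 ≤ s) (hv : d.get? k0 = none)
    (hk : ∀ c ∈ j :: js, (r / s) * (l / s) + c / s = k0) (hy : j % s = 0) :
    (j :: js).foldl (splitA_cell sq l s r) d = d.insert k0 (scat ((j :: js).map (gS sq s r))) := by
  rw [List.foldl_cons, cell_fresh sq l s r j d k0 hv (hk j (by simp))]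
  cases js with
  | nil => simp [scat_cons, scat, gS_first sq s r j hs hy]
  | cons j2 js =>
      rw [fold_cells_some sq l s r j2 js _ k0 (chS sq r j) (PySem.Dict.get?_insert_self _ _ _)
        (fun c hc => hk c (by simp at hc ⊢; tauto)), PySem.Dict.insert_insert_self]
      simp only [List.map_cons, scat_cons, gS_first sq s r j hs hy]

theorem foldl_range_mul {α : Type} (f : α → Nat → α) (m k : Nat) (a : α) :
    (List.range (m * k)).foldl f a =
      (List.range m).foldl (fun a i => (List.range k).foldl (fun a j => f a (i * k + j)) a) a := by
  induction m generalizing a with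
  | zero => simp
  | succ m ih =>
      rw [Nat.succ_mul, List.range_add, List.foldl_append, List.range_succ, List.foldl_append, ih]
      simp [List.foldl_map]

theorem map_range_mul {β : Type} (f : Nat → β) (m k : Nat) :
    (List.range (m * k)).map f =
      (List.range m).flatMap (fun i => (List.range k).map (fun j => f (i * k + j))) := by
  induction m with
  | zero => simp
  | succ m ih =>
      rw [Nat.succ_mul, List.range_add, List.map_append, ih, List.range_succ, List.flatMap_append]
      simp [List.map_map, Function.comp_def]

def rowC (sq : List String) (s r bj : Nat) : String :=
  scat ((List.range s).map (fun j => gS sq s r (bj * s + j)))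

theorem chunk_some (sq : List String) (l s n r bj : Nat) (hs : 2 ≤ s) (hl : l = n * s)
    (d : PySem.Dict Nat String) (v : String) (hbj : bj < n)
    (hv : d.get? ((r / s) * n + bj) = some v) :
    (List.range s).foldl (fun d j => splitA_cell sq l s r d (bj * s + j)) d
      = d.insert ((r / s) * n + bj) (v ++ rowC sq s r bj) := by
  have hs0 : 0 < s := by omega
  have hln : l / s = n := by rw [hl, Nat.mul_div_cancel _ hs0]
  obtain ⟨s', rfl⟩ : ∃ s', s = s' + 1 := ⟨s - 1, by omega⟩
  have hrange : (List.range (s' + 1)).map (fun j => bj * (s' + 1) + j)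
      = (bj * (s' + 1) + 0) :: (List.range s').map (fun j => bj * (s' + 1) + (j + 1)) := by
    rw [List.range_succ_eq_map]
    simp [List.map_map, Function.comp_def, Nat.succ_eq_add_one]
  have hk : ∀ c ∈ (List.range (s' + 1)).map (fun j => bj * (s' + 1) + j),
      (r / (s' + 1)) * (l / (s' + 1)) + c / (s' + 1) = (r / (s' + 1)) * n + bj := by
    intro c hc
    simp only [List.mem_map, List.mem_range] at hc
    obtain ⟨j, hj, rfl⟩ := hc
    rw [hln, Nat.mul_comm bj, Nat.mul_add_div hs0, Nat.div_eq_of_lt hj]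
    omega
  rw [← List.foldl_map (f := fun j => bj * (s' + 1) + j) (g := splitA_cell sq l (s' + 1) r) (l := List.range (s' + 1)) (init := d), hrange]
  rw [hrange] at hk
  rw [fold_cells_some sq l (s' + 1) r _ _ d _ v hv hk]
  have hrc : rowC sq (s' + 1) r bj
      = scat ((((bj * (s' + 1) + 0) :: (List.range s').map (fun j => bj * (s' + 1) + (j + 1)))).map
        (gS sq (s' + 1) r)) := by
    rw [← hrange, List.map_map, rowC]
    simp [Function.comp_def]
  rw [hrc]

theorem chunk_fresh (sq : List String) (l s n r bj : Nat) (hs : 2 ≤ s) (hl : l = n * s)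
    (d : PySem.Dict Nat String) (hbj : bj < n)
    (hv : d.get? ((r / s) * n + bj) = none) :
    (List.range s).foldl (fun d j => splitA_cell sq l s r d (bj * s + j)) d
      = d.insert ((r / s) * n + bj) (rowC sq s r bj) := by
  have hs0 : 0 < s := by omega
  have hln : l / s = n := by rw [hl, Nat.mul_div_cancel _ hs0]
  obtain ⟨s', rfl⟩ : ∃ s', s = s' + 1 := ⟨s - 1, by omega⟩
  have hrange : (List.range (s' + 1)).map (fun j => bj * (s' + 1) + j)
      = (bj * (s' + 1) + 0) :: (List.range s').map (fun j => bj * (s' + 1) + (j + 1)) := by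
    rw [List.range_succ_eq_map]
    simp [List.map_map, Function.comp_def, Nat.succ_eq_add_one]
  have hk : ∀ c ∈ (List.range (s' + 1)).map (fun j => bj * (s' + 1) + j),
      (r / (s' + 1)) * (l / (s' + 1)) + c / (s' + 1) = (r / (s' + 1)) * n + bj := by
    intro c hc
    simp only [List.mem_map, List.mem_range] at hc
    obtain ⟨j, hj, rfl⟩ := hc
    rw [hln, Nat.mul_comm bj, Nat.mul_add_div hs0, Nat.div_eq_of_lt hj]
    omega
  rw [← List.foldl_map (f := fun j => bj * (s' + 1) + j) (g := splitA_cell sq l (s' + 1) r) (l := List.range (s' + 1)) (init := d), hrange]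
  rw [hrange] at hk
  rw [fold_cells_fresh sq l (s' + 1) r _ _ d _ hs hv hk (by simp [Nat.mul_mod_left])]
  have hrc : rowC sq (s' + 1) r bj
      = scat ((((bj * (s' + 1) + 0) :: (List.range s').map (fun j => bj * (s' + 1) + (j + 1)))).map
        (gS sq (s' + 1) r)) := by
    rw [← hrange, List.map_map, rowC]
    simp [Function.comp_def]
  rw [hrc]

def chunkStep (sq : List String) (l s r : Nat) (d : PySem.Dict Nat String) (bj : Nat) :
    PySem.Dict Nat String :=
  (List.range s).foldl (fun d j => splitA_cell sq l s r d (bj * s + j)) d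

theorem row_fresh (sq : List String) (l s n r : Nat) (hs : 2 ≤ s) (hl : l = n * s)
    (d : PySem.Dict Nat String)
    (hnone : ∀ bj, bj < n → d.get? ((r / s) * n + bj) = none) :
    ∀ p, p ≤ n →
      (∀ bj, bj < n → ((List.range p).foldl (chunkStep sq l s r) d).get? ((r / s) * n + bj)
          = if bj < p then some (rowC sq s r bj) else none)
      ∧ (∀ k, (k < (r / s) * n ∨ (r / s) * n + n ≤ k) →
          ((List.range p).foldl (chunkStep sq l s r) d).get? k = d.get? k)
      ∧ ((List.range p).foldl (chunkStep sq l s r) d).keys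
          = d.keys ++ (List.range p).map ((r / s) * n + ·) := by
  intro p
  induction p with
  | zero => intro _; refine ⟨fun bj hbj => by simpa using hnone bj hbj, fun k _ => rfl, by simp⟩
  | succ p ih =>
      intro hp
      obtain ⟨ih1, ih2, ih3⟩ := ih (by omega)
      have hpn : p < n := by omega
      have hvp : ((List.range p).foldl (chunkStep sq l s r) d).get? ((r / s) * n + p) = none := by
        simpa [Nat.lt_irrefl] using ih1 p hpn
      rw [List.range_succ, List.foldl_append, List.foldl_cons, List.foldl_nil]
      rw [chunkStep, chunk_fresh sq l s n r p hs hl _ hpn hvp]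
      refine ⟨?_, ?_, ?_⟩
      · intro bj hbj
        by_cases hbp : bj = p
        · subst hbp
          rw [PySem.Dict.get?_insert_self]
          simp [hbj, Nat.lt_succ_self]
        · rw [PySem.Dict.get?_insert_of_ne _ _ (by omega)]
          rw [ih1 bj hbj]
          by_cases h2 : bj < p
          · simp [h2, (by omega : bj < p + 1)]
          · have h3 : ¬ bj < p + 1 := by omega
            simp [h2, h3]
      · intro k hk
        rw [PySem.Dict.get?_insert_of_ne _ _ (by omega), ih2 k hk]
      · rw [PySem.Dict.keys_insert_of_not_contains _ _
          (by rw [PySem.Dict.contains_eq_isSome_get?, hvp]; rfl), ih3]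
        simp [List.range_succ]

theorem row_some (sq : List String) (l s n r : Nat) (hs : 2 ≤ s) (hl : l = n * s)
    (d : PySem.Dict Nat String) (V : Nat → String)
    (hsome : ∀ bj, bj < n → d.get? ((r / s) * n + bj) = some (V bj)) :
    ∀ p, p ≤ n →
      (∀ bj, bj < n → ((List.range p).foldl (chunkStep sq l s r) d).get? ((r / s) * n + bj)
          = some (if bj < p then V bj ++ rowC sq s r bj else V bj))
      ∧ (∀ k, (k < (r / s) * n ∨ (r / s) * n + n ≤ k) →
          ((List.range p).foldl (chunkStep sq l s r) d).get? k = d.get? k)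
      ∧ ((List.range p).foldl (chunkStep sq l s r) d).keys = d.keys := by
  intro p
  induction p with
  | zero => intro _; refine ⟨fun bj hbj => by simpa using hsome bj hbj, fun k _ => rfl, by simp⟩
  | succ p ih =>
      intro hp
      obtain ⟨ih1, ih2, ih3⟩ := ih (by omega)
      have hpn : p < n := by omega
      have hvp : ((List.range p).foldl (chunkStep sq l s r) d).get? ((r / s) * n + p)
          = some (V p) := by simpa [Nat.lt_irrefl] using ih1 p hpn
      rw [List.range_succ, List.foldl_append, List.foldl_cons, List.foldl_nil]
      rw [chunkStep, chunk_some sq l s n r p hs hl _ (V p) hpn hvp]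
      refine ⟨?_, ?_, ?_⟩
      · intro bj hbj
        by_cases hbp : bj = p
        · subst hbp
          rw [PySem.Dict.get?_insert_self]
          simp [Nat.lt_succ_self]
        · rw [PySem.Dict.get?_insert_of_ne _ _ (by omega)]
          rw [ih1 bj hbj]
          by_cases h2 : bj < p
          · simp [h2, (by omega : bj < p + 1)]
          · have h3 : ¬ bj < p + 1 := by omega
            simp [h2, h3]
      · intro k hk
        rw [PySem.Dict.get?_insert_of_ne _ _ (by omega), ih2 k hk]
      · rw [PySem.Dict.keys_insert_of_contains _ _
          (by rw [PySem.Dict.contains_eq_isSome_get?, hvp]; rfl), ih3]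

def partR (sq : List String) (s m bj t : Nat) : String :=
  scat ((List.range t).map (fun i => rowC sq s (m * s + i) bj))

def blkF (sq : List String) (s n k : Nat) : String := partR sq s (k / n) (k % n) s

theorem scat_append (xs ys : List String) : scat (xs ++ ys) = scat xs ++ scat ys := by
  induction xs with
  | nil => simp [scat]
  | cons x xs ih => simp only [List.cons_append, scat_cons, ih, String.append_assoc]

theorem partR_succ (sq : List String) (s m bj t : Nat) :
    partR sq s m bj (t + 1) = partR sq s m bj t ++ rowC sq s (m * s + t) bj := by
  rw [partR, List.range_succ, List.map_append, scat_append, partR]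
  simp [scat]

def rowStep (sq : List String) (l s : Nat) (d : PySem.Dict Nat String) (r : Nat) :
    PySem.Dict Nat String :=
  (List.range l).foldl (splitA_cell sq l s r) d

theorem rowStep_eq_chunks (sq : List String) (l s n : Nat) (hl : l = n * s)
    (d : PySem.Dict Nat String) (r : Nat) :
    rowStep sq l s d r = (List.range n).foldl (chunkStep sq l s r) d := by
  rw [rowStep, hl, foldl_range_mul]
  rfl

theorem pvDivHelper (m s t : Nat) (hs : 0 < s) (ht : t < s) : (m * s + t) / s = m := by
  rw [Nat.mul_comm, Nat.mul_add_div hs, Nat.div_eq_of_lt ht]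
  omega

theorem blockrow (sq : List String) (l s n m : Nat) (hs : 2 ≤ s) (hl : l = n * s) (hm : m < n)
    (d : PySem.Dict Nat String) (hkeys : d.keys = List.range (m * n)) :
    ∀ t, 1 ≤ t → t ≤ s →
      (∀ bj, bj < n →
        ((List.range t).foldl (fun d ti => rowStep sq l s d (m * s + ti)) d).get? (m * n + bj)
          = some (partR sq s m bj t))
      ∧ (∀ k, k < m * n →
        ((List.range t).foldl (fun d ti => rowStep sq l s d (m * s + ti)) d).get? k = d.get? k)
      ∧ ((List.range t).foldl (fun d ti => rowStep sq l s d (m * s + ti)) d).keys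
          = List.range (m * n + n) := by
  intro t
  induction t with
  | zero => omega
  | succ t ih =>
      intro _ hts
      by_cases ht0 : t = 0
      · subst ht0
        simp only [Nat.zero_add, List.range_one, List.foldl_cons, List.foldl_nil]
        rw [rowStep_eq_chunks sq l s n hl d (m * s + 0)]
        have hdiv : (m * s + 0) / s = m := pvDivHelper m s 0 (by omega) (by omega)
        have hnone : ∀ bj, bj < n → d.get? ((m * s + 0) / s * n + bj) = none := by
          intro bj hbj
          rw [hdiv, PySem.Dict.get?_eq_none_iff_not_mem_keys, hkeys, List.mem_range]
          omega
        obtain ⟨c1, c2, c3⟩ := row_fresh sq l s n (m * s + 0) hs hl d hnone n (le_refl n)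
        rw [hdiv] at c1 c2 c3
        refine ⟨?_, ?_, ?_⟩
        · intro bj hbj
          rw [c1 bj hbj]
          have : partR sq s m bj 1 = rowC sq s (m * s + 0) bj := by
            rw [partR, List.range_one, List.map_cons, List.map_nil, scat_cons, scat_nil,
              String.append_empty]
          rw [this, if_pos hbj]
        · intro k hk
          exact c2 k (by omega)
        · rw [c3, hkeys, ← List.range_add]
      · have ht1 : 1 ≤ t := by omega
        obtain ⟨ih1, ih2, ih3⟩ := ih ht1 (by omega)
        rw [List.range_succ, List.foldl_append, List.foldl_cons, List.foldl_nil]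
        rw [rowStep_eq_chunks sq l s n hl _ (m * s + t)]
        have hdiv : (m * s + t) / s = m := pvDivHelper m s t (by omega) (by omega)
        have hsome : ∀ bj, bj < n →
            ((List.range t).foldl (fun d ti => rowStep sq l s d (m * s + ti)) d).get?
              ((m * s + t) / s * n + bj) = some (partR sq s m bj t) := by
          intro bj hbj
          rw [hdiv]
          exact ih1 bj hbj
        obtain ⟨c1, c2, c3⟩ := row_some sq l s n (m * s + t) hs hl _
          (fun bj => partR sq s m bj t) hsome n (le_refl n)
        rw [hdiv] at c1 c2
        refine ⟨?_, ?_, ?_⟩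
        · intro bj hbj
          rw [c1 bj hbj]
          simp [hbj, partR_succ]
        · intro k hk
          rw [c2 k (by omega)]
          exact ih2 k hk
        · rw [c3, ih3]

theorem pvModHelper (m s t : Nat) (ht : t < s) : (m * s + t) % s = t := by
  rw [Nat.mul_comm, Nat.mul_add_mod, Nat.mod_eq_of_lt ht]

theorem outer (sq : List String) (l s n : Nat) (hs : 2 ≤ s) (hl : l = n * s) :
    ∀ m, m ≤ n →
      (((List.range m).foldl (fun d mi =>
          (List.range s).foldl (fun d ti => rowStep sq l s d (mi * s + ti)) d)
          PySem.Dict.empty).keys = List.range (m * n))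
      ∧ (∀ k, k < m * n →
        ((List.range m).foldl (fun d mi =>
          (List.range s).foldl (fun d ti => rowStep sq l s d (mi * s + ti)) d)
          PySem.Dict.empty).get? k = some (blkF sq s n k)) := by
  intro m
  induction m with
  | zero => intro _; exact ⟨by simp, fun k hk => by omega⟩
  | succ m ih =>
      intro hm
      obtain ⟨ih1, ih2⟩ := ih (by omega)
      rw [List.range_succ, List.foldl_append, List.foldl_cons, List.foldl_nil]
      obtain ⟨b1, b2, b3⟩ := blockrow sq l s n m hs hl (by omega) _ ih1 s (by omega) (le_refl s)
      refine ⟨?_, ?_⟩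
      · rw [b3, Nat.succ_mul]
      · intro k hk
        by_cases hkm : k < m * n
        · rw [b2 k hkm, ih2 k hkm]
        · have hbj : k - m * n < n := by
            rw [Nat.succ_mul] at hk; omega
          have hkeq : m * n + (k - m * n) = k := by omega
          have hb := b1 (k - m * n) hbj
          rw [hkeq] at hb
          rw [hb]
          have hbv : blkF sq s n k = partR sq s m (k - m * n) s := by
            rw [blkF, ← hkeq, pvDivHelper m n (k - m * n) (by omega) hbj,
              pvModHelper m n (k - m * n) hbj]
            have h5 : m * n + (k - m * n) - m * n = k - m * n := by omega
            rw [h5]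
          rw [hbv]

theorem dict_size_eq_keys_length {κ ν : Type} [BEq κ] (d : PySem.Dict κ ν) :
    d.size = d.keys.length := by
  simp [PySem.Dict.size, PySem.Dict.keys]

theorem splitA_build_eq (sq : List String) (l s n : Nat) (hs : 2 ≤ s) (hl : l = n * s) :
    splitA_build sq l s = (List.range (n * n)).map (blkF sq s n) := by
  subst hl
  have heq : (List.range (n * s)).foldl
      (fun d r => (List.range (n * s)).foldl (splitA_cell sq (n * s) s r) d) PySem.Dict.empty
      = (List.range n).foldl (fun d mi =>
          (List.range s).foldl (fun d ti => rowStep sq (n * s) s d (mi * s + ti)) d)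
          PySem.Dict.empty :=
    foldl_range_mul (rowStep sq (n * s) s) n s PySem.Dict.empty
  simp only [splitA_build]
  rw [heq]
  obtain ⟨h1, h2⟩ := outer sq (n * s) s n hs rfl n (le_refl n)
  rw [dict_size_eq_keys_length, h1, List.length_range]
  exact List.map_congr_left (fun i hi => by
    rw [h2 i (List.mem_range.mp hi)]
    rfl)

theorem splitB_build_eq (rows : List String) (l s n : Nat) (hs : 0 < s) (hl : l = n * s) :
    splitB_build rows l s
      = (List.range n).flatMap (fun bi => (List.range n).map (splitB_block rows s bi)) := by
  have hln : l / s = n := by rw [hl, Nat.mul_div_cancel _ hs]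
  simp only [splitB_build, hln]
  have hcong := PySem.List.foldl_congr_mem
    (f := fun blocks bi =>
      (List.range n).foldl (fun blocks bj => blocks ++ [splitB_block rows s bi bj]) blocks)
    (g := fun acc bi => acc ++ (List.range n).map (splitB_block rows s bi))
    (l := List.range n) (init := ([] : List String))
    (fun acc bi _ => PySem.List.foldl_append_singleton_eq_map _ _ _)
  rw [hcong]
  rw [PySem.List.foldl_append_eq_flatMap]
  simp

theorem dropTake_map {α : Type} (xs : List α) (a k : Nat) (h : a + k ≤ xs.length) (dflt : α) :
    (xs.drop a).take k = (List.range k).map (fun i => xs.getD (a + i) dflt) := by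
  apply List.ext_getElem
  · simp; omega
  · intro i h1 h2
    simp only [List.getElem_take, List.getElem_drop, List.getElem_map, List.getElem_range]
    rw [List.getD_eq_getElem _ _ (by simp at h1 ⊢; omega)]

theorem toList_scat (ls : List String) : (scat ls).toList = (ls.map String.toList).flatten := by
  induction ls with
  | nil => simp [scat]
  | cons x ls ih => simp only [scat_cons, String.toList_append, ih, List.map_cons,
      List.flatten_cons]

theorem join_slash_list (ps : List (List Char)) (p : List Char) :
    (ps.map (· ++ ['/'])).flatten ++ p = PySem.Chars.join ['/'] (ps ++ [p]) := by
  induction ps with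
  | nil => simp [PySem.Chars.join_singleton]
  | cons q ps ih =>
      rw [List.map_cons, List.flatten_cons, List.append_assoc, ih]
      rcases hps : ps ++ [p] with _ | ⟨x, rest⟩
      · exact absurd hps (by simp)
      · rw [List.cons_append, hps, PySem.Chars.join_cons_cons, ← hps]

theorem join_slash (g : Nat → List Char) (t : Nat) :
    (((List.range t).map (fun i => g i ++ ['/'])).flatten) ++ g t
      = PySem.Chars.join ['/'] ((List.range (t + 1)).map g) := by
  rw [List.range_succ, List.map_append, List.map_singleton, ← join_slash_list]
  simp [List.map_map, Function.comp_def]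

theorem chS_toList (sq : List String) (r c : Nat) (hr : r < sq.length)
    (hc : c < (sq.getD r "").toList.length) :
    (chS sq r c).toList = [(sq.getD r "").toList.getD c ' '] := by
  rw [chS, PySem.List.pyGetD_natCast]
  simp only [PySem.Str.pyGet?]
  show ((PySem.List.pyGet? (sq.getD r "").toList (c : Int)).getD ' ').toString.toList = _
  rw [PySem.List.pyGet?_natCast, List.getElem?_eq_getElem hc, List.getD_eq_getElem _ _ hc]
  simp

theorem gS_toList (sq : List String) (s r c : Nat) (hr : r < sq.length)
    (hc : c < (sq.getD r "").toList.length) :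
    (gS sq s r c).toList
      = [(sq.getD r "").toList.getD c ' ']
        ++ (if c % s = s - 1 ∧ (r % s) * s + (c % s) + 1 ≠ s ^ 2 then ['/'] else []) := by
  rw [gS, String.toList_append, chS_toList sq r c hr hc]
  split_ifs with h <;> simp

theorem flatten_singletons {α β : Type} (g : β → α) (l : List β) :
    (l.map (fun x => [g x])).flatten = l.map g := by
  induction l with
  | nil => rfl
  | cons x xs ih => simp [ih]

theorem rowC_toList (sq : List String) (s n l : Nat) (hs : 2 ≤ s) (hl : l = n * s)
    (hsq : sq.length = l) (hrow : ∀ row ∈ sq, l ≤ row.toList.length)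
    (bi bj i : Nat) (hbi : bi < n) (hbj : bj < n) (hi : i < s) :
    (rowC sq s (bi * s + i) bj).toList
      = (List.range s).map (fun j => (sq.getD (bi * s + i) "").toList.getD (bj * s + j) ' ')
        ++ (if i = s - 1 then [] else ['/']) := by
  obtain ⟨s', rfl⟩ : ∃ s', s = s' + 1 := ⟨s - 1, by omega⟩
  have e : s' + 1 - 1 = s' := by omega
  rw [e]
  have hr : bi * (s' + 1) + i < sq.length := by
    rw [hsq, hl]
    calc bi * (s' + 1) + i < bi * (s' + 1) + (s' + 1) := by omega
      _ = (bi + 1) * (s' + 1) := by ring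
      _ ≤ n * (s' + 1) := Nat.mul_le_mul_right (s' + 1) hbi
  have hrowlen : l ≤ (sq.getD (bi * (s' + 1) + i) "").toList.length := by
    apply hrow
    rw [List.getD_eq_getElem _ _ hr]
    exact List.getElem_mem hr
  have hcbound : ∀ j, j < s' + 1 →
      bj * (s' + 1) + j < (sq.getD (bi * (s' + 1) + i) "").toList.length := by
    intro j hj
    have : bj * (s' + 1) + j < n * (s' + 1) := by
      calc bj * (s' + 1) + j < bj * (s' + 1) + (s' + 1) := by omega
        _ = (bj + 1) * (s' + 1) := by ring
        _ ≤ n * (s' + 1) := Nat.mul_le_mul_right (s' + 1) hbj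
    omega
  rw [rowC, toList_scat, List.map_map]
  simp only [Function.comp_def]
  have hmap : ((List.range (s' + 1)).map
        (fun j => ((gS sq (s' + 1) (bi * (s' + 1) + i) (bj * (s' + 1) + j)).toList)))
      = ((List.range (s' + 1)).map (fun j =>
          [(sq.getD (bi * (s' + 1) + i) "").toList.getD (bj * (s' + 1) + j) ' ']
          ++ (if j = s' ∧ i ≠ s' then ['/'] else []))) := by
    apply List.map_congr_left
    intro j hj
    rw [List.mem_range] at hj
    rw [gS_toList sq (s' + 1) (bi * (s' + 1) + i) (bj * (s' + 1) + j) hr (hcbound j hj)]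
    congr 1
    rw [pvModHelper bj (s' + 1) j hj, pvModHelper bi (s' + 1) i hi, e]
    refine if_congr ?_ rfl rfl
    constructor
    · rintro ⟨hj1, h⟩
      refine ⟨hj1, fun hcon => h ?_⟩
      rw [hj1, hcon]
      ring
    · rintro ⟨hj1, hne⟩
      refine ⟨hj1, fun hcon => hne ?_⟩
      rw [hj1] at hcon
      have h2 : (i + 1) * (s' + 1) = (s' + 1) * (s' + 1) := by
        have expand : (i + 1) * (s' + 1) = i * (s' + 1) + s' + 1 := by ring
        have expand2 : (s' + 1) * (s' + 1) = (s' + 1) ^ 2 := by ring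
        rw [expand, expand2, hcon]
      have := Nat.eq_of_mul_eq_mul_right (Nat.succ_pos s') h2
      omega
  rw [hmap]
  rw [List.range_succ, List.map_append, List.map_append, List.flatten_append]
  simp only [List.map_singleton, List.flatten_cons, List.flatten_nil, List.append_nil]
  have hmap2 : (List.range s').map (fun j =>
        [(sq.getD (bi * (s' + 1) + i) "").toList.getD (bj * (s' + 1) + j) ' ']
          ++ if j = s' ∧ i ≠ s' then ['/'] else [])
      = (List.range s').map (fun j =>
        [(sq.getD (bi * (s' + 1) + i) "").toList.getD (bj * (s' + 1) + j) ' ']) := by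
    apply List.map_congr_left
    intro j hj
    rw [List.mem_range] at hj
    rw [if_neg (fun h => absurd h.1 (by omega : ¬ j = s'))]
    simp
  rw [hmap2, flatten_singletons
    (fun j => (sq.getD (bi * (s' + 1) + i) "").toList.getD (bj * (s' + 1) + j) ' ')
    (List.range s')]
  by_cases hi2 : i = s' <;> simp [hi2, List.append_assoc]

theorem block_eq (sq : List String) (l s n bi bj : Nat) (hs : 2 ≤ s) (hl : l = n * s)
    (hsq : sq.length = l) (hrow : ∀ row ∈ sq, l ≤ row.toList.length)
    (hbi : bi < n) (hbj : bj < n) :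
    blkF sq s n (bi * n + bj) = splitB_block sq s bi bj := by
  apply String.toList_inj.mp
  have hdm : (bi * n + bj) / n = bi := pvDivHelper bi n bj (by omega) hbj
  have hmm : (bi * n + bj) % n = bj := pvModHelper bi n bj hbj
  rw [blkF, hdm, hmm, partR, toList_scat, List.map_map]
  simp only [Function.comp_def]
  obtain ⟨s', rfl⟩ : ∃ s', s = s' + 1 := ⟨s - 1, by omega⟩
  have e : s' + 1 - 1 = s' := by omega
  set g : Nat → List Char := fun i => (List.range (s' + 1)).map
      (fun j => (sq.getD (bi * (s' + 1) + i) "").toList.getD (bj * (s' + 1) + j) ' ') with hg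
  have hmap : (List.range (s' + 1)).map (fun i => (rowC sq (s' + 1) (bi * (s' + 1) + i) bj).toList)
      = (List.range (s' + 1)).map (fun i => g i ++ (if i = s' then [] else ['/'])) := by
    apply List.map_congr_left
    intro i hi
    rw [List.mem_range] at hi
    rw [rowC_toList sq (s' + 1) n l hs hl hsq hrow bi bj i hbi hbj hi, e, hg]
  rw [hmap]
  have hL : ((List.range (s' + 1)).map (fun i => g i ++ (if i = s' then [] else ['/']))).flatten
      = PySem.Chars.join ['/'] ((List.range (s' + 1)).map g) := by
    rw [List.range_succ, List.map_append, List.flatten_append]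
    have hmap3 : (List.range s').map (fun i => g i ++ (if i = s' then [] else ['/']))
        = (List.range s').map (fun i => g i ++ ['/']) := by
      apply List.map_congr_left
      intro i hi
      rw [List.mem_range] at hi
      rw [if_neg (by omega : ¬ i = s')]
    rw [hmap3]
    simp only [List.map_singleton, List.flatten_cons, List.flatten_nil, List.append_nil,
      if_true]
    rw [← List.range_succ]
    exact join_slash g s'
  rw [hL]
  -- right side
  rw [splitB_block, PySem.Str.toList_join]
  have hsep : ("/" : String).toList = ['/'] := rfl
  rw [hsep]
  congr 1
  have hsl : PySem.List.slice sq (some ((bi * (s' + 1) : Nat) : Int))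
      (some (((bi * (s' + 1) : Nat) : Int) + ((s' + 1 : Nat) : Int)))
      = (sq.drop (bi * (s' + 1))).take (s' + 1) :=
    PySem.List.slice_natCast_add sq (bi * (s' + 1)) (s' + 1)
  rw [hsl, dropTake_map sq (bi * (s' + 1)) (s' + 1)
    (by rw [hsq, hl]
        calc bi * (s' + 1) + (s' + 1) = (bi + 1) * (s' + 1) := by ring
          _ ≤ n * (s' + 1) := Nat.mul_le_mul_right (s' + 1) hbi) ""]
  rw [List.map_map, List.map_map]
  apply List.map_congr_left
  intro i hi
  rw [List.mem_range] at hi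
  simp only [Function.comp_def]
  rw [PySem.Str.toList_slice]
  symm
  show PySem.List.slice (sq.getD (bi * (s' + 1) + i) "").toList
      (some ((bj * (s' + 1) : Nat) : Int))
      (some (((bj * (s' + 1) : Nat) : Int) + ((s' + 1 : Nat) : Int))) = _
  rw [PySem.List.slice_natCast_add]
  have hrl : bj * (s' + 1) + (s' + 1) ≤ (sq.getD (bi * (s' + 1) + i) "").toList.length := by
    have hr : bi * (s' + 1) + i < sq.length := by
      rw [hsq, hl]
      calc bi * (s' + 1) + i < bi * (s' + 1) + (s' + 1) := by omega
        _ = (bi + 1) * (s' + 1) := by ring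
        _ ≤ n * (s' + 1) := Nat.mul_le_mul_right (s' + 1) hbi
    have hmem : sq.getD (bi * (s' + 1) + i) "" ∈ sq := by
      rw [List.getD_eq_getElem _ _ hr]
      exact List.getElem_mem hr
    have := hrow _ hmem
    have hb : bj * (s' + 1) + (s' + 1) ≤ l := by
      rw [hl]
      calc bj * (s' + 1) + (s' + 1) = (bj + 1) * (s' + 1) := by ring
        _ ≤ n * (s' + 1) := Nat.mul_le_mul_right (s' + 1) hbj
    omega
  rw [dropTake_map _ (bj * (s' + 1)) (s' + 1) hrl ' ']

theorem build_eq (sq : List String) (l s n : Nat) (hs : 2 ≤ s) (hl : l = n * s)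
    (hsq : sq.length = l) (hrow : ∀ row ∈ sq, l ≤ row.toList.length) :
    splitA_build sq l s = splitB_build sq l s := by
  rw [splitA_build_eq sq l s n hs hl, splitB_build_eq sq l s n (by omega) hl]
  rw [map_range_mul (blkF sq s n) n n]
  rw [List.flatMap_def, List.flatMap_def]
  congr 1
  apply List.map_congr_left
  intro bi hbi
  rw [List.mem_range] at hbi
  apply List.map_congr_left
  intro bj hbj
  rw [List.mem_range] at hbj
  exact block_eq sq l s n bi bj hs hl hsq hrow hbi hbj

theorem split_square_eq (square : String) (hpre : Pre_split_square square) :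
    split_square square = split_square_alt square := by
  rw [Pre_split_square] at hpre
  rw [split_square, split_square_alt]
  set sq := (PySem.Str.split? square "/").getD [] with hsq
  by_cases h3 : 3 < sq.length
  · obtain ⟨hdvd, hrow⟩ := hpre h3
    rw [if_pos h3, if_neg (show ¬ sq.length ≤ 3 from by omega)]
    by_cases h2 : sq.length % 2 = 0
    · simp only [h2, if_true]
      exact build_eq sq sq.length 2 (sq.length / 2) (by omega)
        ((Nat.div_mul_cancel (Nat.dvd_of_mod_eq_zero h2)).symm) rfl hrow
    · have h3d : sq.length % 3 = 0 := by tauto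
      simp only [h2, h3d, if_true, if_false]
      exact build_eq sq sq.length 3 (sq.length / 3) (by omega)
        ((Nat.div_mul_cancel (Nat.dvd_of_mod_eq_zero h3d)).symm) rfl hrow
  · rw [if_neg h3, if_pos (by omega)]

-- ===== VERDICT (by name: the statement is the Claim_ definition above) =====
theorem split_square_spec : Claim_equal_split_square := by
  intro square _ hpre
  unfold Spec_split_square
  exact split_square_eq square hpre
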